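-- pv_equiv track=rewrite | github.com/jaromil/dotfiles | bin/scrape.py | normalize_text_block
-- ===== SOURCE A (Python) =====
-- def normalize_text_block(text: str) -> str:
--     """Normalize multi-line text while preserving paragraph boundaries."""
--     lines = [line.strip() for line in text.splitlines()]
--     normalized: list[str] = []
--     previous_blank = False
--     for line in lines:
--         is_blank = line == ""
--         if is_blank and previous_blank:
--             continue
--         normalized.append(line)
--         previous_blank = is_blank
--     return "\n".join(normalized).strip()
-- ===== SOURCE B (Python) =====
-- def normalize_text_block(text: str) -> str:
--     """Normalize multi-line text while preserving paragraph boundaries."""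
--     paragraphs: list[str] = []
--     current: list[str] = []
--     for raw in text.splitlines():
--         line = raw.strip()
--         if line:
--             current.append(line)
--         elif current:
--             paragraphs.append("\n".join(current))
--             current = []
--     if current:
--         paragraphs.append("\n".join(current))
--     return "\n\n".join(paragraphs)
-- ===== Notes on version B (the rewrite author's own statement) =====
-- stated objective: alternative
-- what changed: B groups the stripped lines into paragraphs (maximal runs of non-blank lines) and joins the paragraphs with '\n\n', instead of A's previous_blank state machine that emits at most one blank separator line and then strips the joined result; B never emits blank lines and needs no final strip.
import Mathlib
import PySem

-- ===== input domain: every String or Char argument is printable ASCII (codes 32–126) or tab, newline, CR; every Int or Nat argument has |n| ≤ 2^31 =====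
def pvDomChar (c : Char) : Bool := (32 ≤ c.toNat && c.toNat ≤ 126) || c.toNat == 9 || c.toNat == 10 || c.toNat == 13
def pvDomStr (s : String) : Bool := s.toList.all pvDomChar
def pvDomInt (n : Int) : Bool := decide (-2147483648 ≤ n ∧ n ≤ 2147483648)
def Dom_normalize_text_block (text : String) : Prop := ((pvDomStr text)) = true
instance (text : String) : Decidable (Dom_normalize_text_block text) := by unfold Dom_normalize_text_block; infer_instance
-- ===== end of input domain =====

-- B groups stripped lines into paragraphs (maximal runs of non-blank lines) and joins the
-- paragraphs with a blank line, instead of A's previous_blank state machine + final strip.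

-- ===== PORT A =====
def normalize_text_block (text : String) : String :=
  let lines := (PySem.Str.splitlines text).map PySem.Str.strip
  let r := lines.foldl (fun (st : List String × Bool) line =>
      let isBlank := line == ""
      if isBlank && st.2 then st
      else (st.1 ++ [line], isBlank)) ([], false)
  PySem.Str.strip (PySem.Str.join "\n" r.1)

-- ===== PORT B =====
def normalize_text_block_alt (text : String) : String :=
  let r := (PySem.Str.splitlines text).foldl
    (fun (st : List String × List String) raw =>
      let line := PySem.Str.strip raw
      if !(line == "") then (st.1, st.2 ++ [line])
      else if !(st.2.isEmpty) then (st.1 ++ [PySem.Str.join "\n" st.2], ([] : List String))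
      else st)
    ([], [])
  let paragraphs := if !(r.2.isEmpty) then r.1 ++ [PySem.Str.join "\n" r.2] else r.1
  PySem.Str.join "\n\n" paragraphs

-- ===== PRECONDITION & SPEC =====
def Spec_normalize_text_block (text : String) (out : String) : Prop := out = normalize_text_block_alt text
instance (text : String) (out : String) : Decidable (Spec_normalize_text_block text out) := by unfold Spec_normalize_text_block; infer_instance

-- ===== CLAIM (what is proved, stated in full; the proofs are below) =====
def Claim_equal_normalize_text_block : Prop := ∀ (text : String), Dom_normalize_text_block text → Spec_normalize_text_block text (normalize_text_block text)

-- ===== LEMMAS AND PROOFS =====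

-- A's loop, as structural recursion on the line list (state = previous_blank).
def goA : List String → Bool → List String
  | [], _ => []
  | h :: t, prev => if (h == "") && prev then goA t prev else h :: goA t (h == "")

-- B's loop, as structural recursion (state = current paragraph's lines).
def goP : List String → List String → List (List String)
  | [], cur => if cur.isEmpty then [] else [cur]
  | h :: t, cur =>
      if !(h == "") then goP t (cur ++ [h])
      else if !(cur.isEmpty) then cur :: goP t [] else goP t []

-- drop leading blank strings / drop trailing blank strings
def dropB (xs : List String) : List String := xs.dropWhile (· == "")
def trimT (xs : List String) : List String := (dropB xs.reverse).reverse

-- "no space at the front": head, if any, is not Python-whitespace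
def headNS (c : List Char) : Bool :=
  match c with
  | [] => true
  | a :: _ => !PySem.Chars.isspace a

theorem foldA_eq_goA (ls : List String) : ∀ (acc : List String) (prev : Bool),
    (ls.foldl (fun (st : List String × Bool) line =>
      let isBlank := line == ""
      if isBlank && st.2 then st
      else (st.1 ++ [line], isBlank)) (acc, prev)).1 = acc ++ goA ls prev := by
  induction ls with
  | nil => intro acc prev; simp [goA]
  | cons h t ih =>
    intro acc prev
    rw [List.foldl_cons]
    by_cases hb : ((h == "") && prev) = true
    · have hstep : (let isBlank := h == ""
          if (isBlank && (acc, prev).2) = true then (acc, prev)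
          else ((acc, prev).1 ++ [h], isBlank)) = (acc, prev) := by simp [hb]
      rw [hstep, ih]
      simp [goA, hb]
    · have hstep : (let isBlank := h == ""
          if (isBlank && (acc, prev).2) = true then (acc, prev)
          else ((acc, prev).1 ++ [h], isBlank)) = (acc ++ [h], h == "") := by simp [hb]
      rw [hstep, ih]
      simp [goA, hb]

theorem foldB_eq_goP (raws : List String) : ∀ (acc cur : List String),
    (let r := raws.foldl
        (fun (st : List String × List String) raw =>
          let line := PySem.Str.strip raw
          if !(line == "") then (st.1, st.2 ++ [line])
          else if !(st.2.isEmpty) then (st.1 ++ [PySem.Str.join "\n" st.2], ([] : List String))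
          else st) (acc, cur)
     if !(r.2.isEmpty) then r.1 ++ [PySem.Str.join "\n" r.2] else r.1)
    = acc ++ (goP (raws.map PySem.Str.strip) cur).map (PySem.Str.join "\n") := by
  induction raws with
  | nil =>
    intro acc cur
    by_cases hc : cur.isEmpty
    · simp [goP, hc]
    · simp [goP, hc]
  | cons raw t ih =>
    intro acc cur
    simp only [List.foldl_cons, List.map_cons]
    by_cases hl : (PySem.Str.strip raw == "") = true
    · by_cases hc : cur.isEmpty
      · have hcur : cur = [] := by simpa [List.isEmpty_iff] using hc
        simpa [hl, hc, goP, hcur] using ih acc []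
      · simpa [hl, hc, goP, List.map_cons] using ih (acc ++ [PySem.Str.join "\n" cur]) []
    · simpa [hl, goP] using ih acc (cur ++ [PySem.Str.strip raw])

-- membership in goA's output
theorem goA_mem (ls : List String) : ∀ (prev : Bool) (x : String),
    x ∈ goA ls prev → x = "" ∨ x ∈ ls := by
  induction ls with
  | nil => intro prev x hx; simp [goA] at hx
  | cons h t ih =>
    intro prev x hx
    simp only [goA] at hx
    split at hx
    · rcases ih prev x hx with h1 | h1
      · exact Or.inl h1
      · exact Or.inr (List.mem_cons_of_mem _ h1)
    · rcases List.mem_cons.mp hx with h1 | h1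
      · exact Or.inr (by simp [h1])
      · rcases ih (h == "") x h1 with h2 | h2
        · exact Or.inl h2
        · exact Or.inr (List.mem_cons_of_mem _ h2)

-- goP's paragraphs: nonempty, and all of their lines non-blank
theorem goP_mem (ls : List String) : ∀ (cur : List String), (∀ x ∈ cur, ¬(x = "")) →
    ∀ p ∈ goP ls cur, p ≠ [] ∧ ∀ x ∈ p, ¬(x = "") := by
  induction ls with
  | nil =>
    intro cur hcur p hp
    simp only [goP] at hp
    split at hp
    · simp at hp
    · rename_i hne
      have : p = cur := by simpa using hp
      subst this
      exact ⟨by simpa [List.isEmpty_iff] using hne, hcur⟩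
  | cons h t ih =>
    intro cur hcur p hp
    simp only [goP] at hp
    by_cases hh : (h == "") = true
    · simp only [hh, Bool.not_true, Bool.false_eq_true, if_false] at hp
      by_cases hc : cur.isEmpty
      · simp only [hc, Bool.not_true, Bool.false_eq_true, if_false] at hp
        exact ih [] (by simp) p hp
      · simp only [hc, Bool.not_false, if_true] at hp
        rcases List.mem_cons.mp hp with h1 | h1
        · subst h1
          exact ⟨by simpa [List.isEmpty_iff] using hc, hcur⟩
        · exact ih [] (by simp) p h1
    · simp only [hh, Bool.not_false, if_true] at hp
      refine ih (cur ++ [h]) ?_ p hp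
      intro x hx
      rcases List.mem_append.mp hx with h1 | h1
      · exact hcur x h1
      · simp only [List.mem_singleton] at h1
        subst h1
        simpa using hh

-- dropping leading blanks from goA's outputs
theorem dropB_goA_true (ls : List String) : dropB (goA ls true) = goA ls true := by
  induction ls with
  | nil => simp [goA, dropB]
  | cons h t ih =>
    by_cases hh : (h == "") = true
    · simp [goA, hh, ih]
    · simp [goA, hh, dropB]

theorem dropB_goA_false (ls : List String) : dropB (goA ls false) = goA ls true := by
  cases ls with
  | nil => simp [goA, dropB]
  | cons h t =>
    by_cases hh : (h == "") = true
    · have h1 : h = "" := by simpa using hh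
      subst h1
      simp only [goA, hh]
      simp only [Bool.and_false, Bool.and_true]
      simpa [dropB] using dropB_goA_true t
    · simp [goA, hh, dropB]

-- intercalate expansion lemmas (generic)
theorem inter_cons {α : Type} (sep a : List α) (l : List (List α)) (h : l ≠ []) :
    sep.intercalate (a :: l) = a ++ sep ++ sep.intercalate l := by
  cases l with
  | nil => exact absurd rfl h
  | cons b t => simp [List.intercalate, List.intersperse, List.append_assoc]

theorem inter_append {α : Type} (sep : List α) (xs ys : List (List α))
    (hx : xs ≠ []) (hy : ys ≠ []) :
    sep.intercalate (xs ++ ys) = sep.intercalate xs ++ sep ++ sep.intercalate ys := by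
  induction xs with
  | nil => exact absurd rfl hx
  | cons x t ih =>
    cases t with
    | nil =>
      simp only [List.cons_append, List.nil_append]
      rw [inter_cons sep x ys hy]
      simp [List.intercalate]
    | cons x2 t2 =>
      have h1 : (x2 :: t2) ++ ys ≠ [] := by simp
      rw [List.cons_append, inter_cons sep x _ h1, inter_cons sep x _ (by simp),
          ih (by simp)]
      simp [List.append_assoc]

theorem inter_ne_nil {α : Type} (sep : List α) (p : List α) (l : List (List α)) (hp : p ≠ []) :
    sep.intercalate (p :: l) ≠ [] := by
  cases l with
  | nil => simpa [List.intercalate] using hp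
  | cons b t =>
    rw [inter_cons sep p _ (by simp)]
    simp [hp]

theorem rev_inter (cs : List (List Char)) :
    (List.intercalate ['\n'] cs).reverse = List.intercalate ['\n'] ((cs.map List.reverse).reverse) := by
  induction cs with
  | nil => simp [List.intercalate]
  | cons c t ih =>
    cases t with
    | nil => simp [List.intercalate]
    | cons d t2 =>
      rw [inter_cons _ c _ (by simp)]
      have h2 : ((d :: t2).map List.reverse).reverse ≠ [] := by simp
      rw [List.map_cons, List.reverse_cons,
          inter_append ['\n'] _ [c.reverse] h2 (by simp)]
      simp only [List.reverse_append, List.reverse_cons, List.reverse_nil, List.nil_append]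
      rw [ih]
      simp [List.intercalate, List.append_assoc]

-- head of dropWhile fails the predicate
theorem headNS_dropWhile (l : List Char) : headNS (l.dropWhile PySem.Chars.isspace) = true := by
  induction l with
  | nil => simp [headNS]
  | cons a t ih =>
    by_cases ha : PySem.Chars.isspace a = true
    · simpa [List.dropWhile_cons, ha] using ih
    · simp [ha, headNS]

theorem headNS_of_eq_append (l a b : List Char) (hl : l = a ++ b) (h : headNS l = true) :
    headNS a = true := by
  cases a with
  | nil => rfl
  | cons x r => subst hl; simpa [headNS] using h

-- a stripped string has no whitespace at either edge
theorem strip_headNS (s : List Char) : headNS (PySem.Chars.strip s) = true := by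
  have h1 : headNS (PySem.Chars.lstrip s) = true := headNS_dropWhile s
  obtain ⟨t, ht⟩ := List.dropWhile_suffix (l := (PySem.Chars.lstrip s).reverse) (p := PySem.Chars.isspace)
  have hY : PySem.Chars.lstrip s = (List.dropWhile PySem.Chars.isspace (PySem.Chars.lstrip s).reverse).reverse ++ t.reverse := by
    have := congrArg List.reverse ht
    simpa [List.reverse_append] using this.symm
  have h2 := headNS_of_eq_append (PySem.Chars.lstrip s) _ t.reverse hY h1
  simpa [PySem.Chars.strip, PySem.Chars.rstrip, headNS] using h2

theorem strip_revHeadNS (s : List Char) : headNS (PySem.Chars.strip s).reverse = true := by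
  have : (PySem.Chars.strip s).reverse = List.dropWhile PySem.Chars.isspace (PySem.Chars.lstrip s).reverse := by
    simp [PySem.Chars.strip, PySem.Chars.rstrip]
  rw [this]
  exact headNS_dropWhile _

-- lstrip over an intercalate of edge-clean pieces drops exactly the leading empty pieces
theorem lstrip_inter (cs : List (List Char)) (h : ∀ c ∈ cs, headNS c = true) :
    PySem.Chars.lstrip (List.intercalate ['\n'] cs)
      = List.intercalate ['\n'] (cs.dropWhile (· == [])) := by
  induction cs with
  | nil => simp [List.intercalate, PySem.Chars.lstrip]
  | cons c t ih =>
    cases t with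
    | nil =>
      cases c with
      | nil => simp [List.intercalate, PySem.Chars.lstrip]
      | cons a r =>
        have ha : PySem.Chars.isspace a = false := by
          have := h (a :: r) (by simp)
          simpa [headNS] using this
        simp [List.intercalate, PySem.Chars.lstrip, ha]
    | cons d t2 =>
      rw [inter_cons _ c _ (by simp)]
      cases c with
      | nil =>
        have hnl : PySem.Chars.isspace '\n' = true := by decide
        have hstep : PySem.Chars.lstrip ([] ++ ['\n'] ++ List.intercalate ['\n'] (d :: t2))
            = PySem.Chars.lstrip (List.intercalate ['\n'] (d :: t2)) := by
          simp [PySem.Chars.lstrip, hnl]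
        rw [hstep, ih (fun c hc => h c (by simp [hc]))]
        simp
      | cons a r =>
        have ha : PySem.Chars.isspace a = false := by
          have := h (a :: r) (by simp)
          simpa [headNS] using this
        have hL : PySem.Chars.lstrip ((a :: r) ++ ['\n'] ++ List.intercalate ['\n'] (d :: t2))
            = (a :: r) ++ ['\n'] ++ List.intercalate ['\n'] (d :: t2) := by
          simp only [List.cons_append]
          simp [PySem.Chars.lstrip, ha]
        rw [hL]
        have hD : List.dropWhile (fun x => x == []) ((a :: r) :: d :: t2) = (a :: r) :: d :: t2 := by
          rw [List.dropWhile_cons]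
          simp
        rw [hD, inter_cons _ (a :: r) _ (by simp)]

theorem rstrip_inter (cs : List (List Char)) (h : ∀ c ∈ cs, headNS c.reverse = true) :
    PySem.Chars.rstrip (List.intercalate ['\n'] cs)
      = List.intercalate ['\n'] ((cs.reverse.dropWhile (· == [])).reverse) := by
  have h1 : PySem.Chars.rstrip (List.intercalate ['\n'] cs)
      = (PySem.Chars.lstrip (List.intercalate ['\n'] ((cs.map List.reverse).reverse))).reverse := by
    rw [PySem.Chars.rstrip, rev_inter]
    rfl
  rw [h1, lstrip_inter _ (by
    intro c hc
    rw [List.mem_reverse, List.mem_map] at hc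
    obtain ⟨c0, hc0, rfl⟩ := hc
    exact h c0 hc0)]
  have h2 : ((cs.map List.reverse).reverse).dropWhile (· == [])
      = (cs.reverse.dropWhile (· == [])).map List.reverse := by
    rw [← List.map_reverse, List.dropWhile_map]
    have hpred : ((fun (c : List Char) => c == []) ∘ List.reverse) = (fun (c : List Char) => c == []) := by
      funext c
      cases c <;> simp
    rw [hpred]
  rw [h2, rev_inter]
  congr 1
  rw [List.map_map]
  simp

theorem strip_inter (cs : List (List Char)) (h : ∀ c ∈ cs, headNS c = true ∧ headNS c.reverse = true) :
    PySem.Chars.strip (List.intercalate ['\n'] cs)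
      = List.intercalate ['\n'] ((((cs.dropWhile (· == [])).reverse).dropWhile (· == [])).reverse) := by
  rw [PySem.Chars.strip, lstrip_inter _ (fun c hc => (h c hc).1)]
  exact rstrip_inter _ (fun c hc => (h c ((List.dropWhile_sublist _).subset hc)).2)

-- toList bridges: the blank test commutes with toList
theorem blank_toList : (fun (x : String) => x.toList == ([] : List Char)) = (fun x => x == "") := by
  funext x
  by_cases hx : x = ""
  · subst hx; rfl
  · have h1 : (x.toList == ([] : List Char)) = false := by
      have hne : x.toList ≠ [] := by
        intro hc
        exact hx (String.toList_inj.mp (by simpa using hc))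
      simpa using hne
    have h2 : (x == "") = false := by simpa using hx
    rw [h1, h2]

theorem mapDrop (M : List String) :
    (M.map String.toList).dropWhile (fun c => c == ([] : List Char))
      = (M.dropWhile (· == "")).map String.toList := by
  rw [List.dropWhile_map]
  have hcomp : ((fun (c : List Char) => c == ([] : List Char)) ∘ String.toList)
      = (fun (x : String) => x == "") := by
    funext x
    exact congrFun blank_toList x
  rw [hcomp]

-- strip ∘ join over edge-clean strings = join over leading/trailing-blank-trimmed list
theorem strip_join (L : List String)
    (h : ∀ x ∈ L, headNS x.toList = true ∧ headNS x.toList.reverse = true) :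
    PySem.Str.strip (PySem.Str.join "\n" L) = PySem.Str.join "\n" (trimT (dropB L)) := by
  apply String.toList_inj.mp
  rw [PySem.Str.toList_strip, PySem.Str.toList_join, PySem.Str.toList_join]
  have hsep : ("\n" : String).toList = ['\n'] := rfl
  rw [hsep]
  show PySem.Chars.strip (List.intercalate ['\n'] (L.map String.toList)) = _
  rw [strip_inter _ (by
    intro c hc
    rw [List.mem_map] at hc
    obtain ⟨x, hx, rfl⟩ := hc
    exact h x hx)]
  show _ = List.intercalate ['\n'] ((trimT (dropB L)).map String.toList)
  congr 1
  rw [trimT, dropB, dropB, mapDrop L, ← List.map_reverse, mapDrop, ← List.map_reverse]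

-- trimT facts
theorem trimT_nonblank (X : List String) (h : ∀ x ∈ X, ¬(x = "")) : trimT X = X := by
  rw [trimT, dropB]
  cases hX : X.reverse with
  | nil => simp_all
  | cons c r =>
    have hc : c ∈ X := by
      rw [← List.mem_reverse, hX]; simp
    have : (c == "") = false := by simpa using h c hc
    rw [List.dropWhile_cons, this]
    simp [← hX]

theorem trimT_append (X Y : List String) (h : trimT Y ≠ []) : trimT (X ++ Y) = X ++ trimT Y := by
  have hd : Y.reverse.dropWhile (· == "") ≠ [] := by
    intro hc
    exact h (by simp [trimT, dropB, hc])
  rw [trimT, dropB, List.reverse_append, List.dropWhile_append]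
  simp only [List.isEmpty_iff, hd, if_false]
  simp [trimT, dropB]

theorem trimT_cons (z : String) (Z : List String) (h : trimT Z ≠ []) :
    trimT (z :: Z) = z :: trimT Z := by
  have := trimT_append [z] Z h
  simpa using this

theorem trimT_eq_nil_all_blank (Z : List String) (h : trimT Z = []) : ∀ x ∈ Z, x = "" := by
  intro x hx
  have h1 : Z.reverse.dropWhile (· == "") = [] := by
    rw [trimT] at h
    have := congrArg List.reverse h
    simpa [dropB] using this
  have := List.dropWhile_eq_nil_iff.mp h1 x (by simpa using hx)
  simpa using this

-- MAIN: B's paragraph grouping equals A's kept-lines list with trailing blanks trimmed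
theorem main_gp (ls : List String) : ∀ (cur : List String), (∀ x ∈ cur, ¬(x = "")) →
    List.intercalate [""] (goP ls cur) = trimT (cur ++ goA ls cur.isEmpty) := by
  induction ls with
  | nil =>
    intro cur hcur
    by_cases hc : cur.isEmpty
    · have : cur = [] := by simpa [List.isEmpty_iff] using hc
      subst this
      simp [goP, goA, trimT, dropB, List.intercalate]
    · simp only [goP, hc, goA, List.append_nil]
      rw [trimT_nonblank cur hcur]
      simp [List.intercalate]
  | cons h t ih =>
    intro cur hcur
    by_cases hh : (h == "") = true
    · have hhe : h = "" := by simpa using hh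
      subst hhe
      by_cases hc : cur.isEmpty
      · have hce : cur = [] := by simpa [List.isEmpty_iff] using hc
        subst hce
        simp only [goP, goA]
        simp only [List.isEmpty_nil, Bool.not_true, Bool.false_eq_true, if_false,
          beq_self_eq_true, Bool.and_true, if_true, List.nil_append]
        exact ih [] (by simp)
      · have hcne : cur ≠ [] := by simpa [List.isEmpty_iff] using hc
        have hc2 : cur.isEmpty = false := by simpa [List.isEmpty_iff] using hcne
        have hgA : goA ("" :: t) cur.isEmpty = "" :: goA t true := by
          simp [goA, hc2]
        rw [hgA]
        have hgP : goP ("" :: t) cur = cur :: goP t [] := by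
          simp [goP, hc2]
        rw [hgP]
        have hIH := ih [] (by simp)
        simp only [List.isEmpty_nil, List.nil_append] at hIH
        by_cases hP : goP t [] = []
        · have hIH0 : trimT (goA t true) = [] := by
            rw [← hIH, hP]
            simp [List.intercalate]
          have hblank : ∀ x ∈ goA t true, x = "" := trimT_eq_nil_all_blank _ hIH0
          rw [hP]
          have h2 : (goA t true).reverse.dropWhile (· == "") = [] := by
            rw [List.dropWhile_eq_nil_iff]
            intro x hx
            simpa using hblank x (by simpa using hx)
          have h3 : (("" :: goA t true).reverse).dropWhile (· == "") = [] := by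
            rw [List.reverse_cons, List.dropWhile_append, h2]
            simp
          have h1 : trimT (cur ++ "" :: goA t true) = cur := by
            rw [trimT, dropB, List.reverse_append, List.dropWhile_append, h3]
            simp only [List.isEmpty_nil, if_true]
            cases hcr : cur.reverse with
            | nil => simp_all
            | cons c r =>
              have hcm : c ∈ cur := by rw [← List.mem_reverse, hcr]; simp
              have : (c == "") = false := by simpa using hcur c hcm
              rw [List.dropWhile_cons, this]
              simp [← hcr]
          rw [h1]
          simp [List.intercalate]
        · rw [inter_cons _ cur _ hP]
          have hPne : List.intercalate [""] (goP t []) ≠ [] := by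
            cases hgp : goP t [] with
            | nil => exact absurd hgp hP
            | cons p ps =>
              have hpne : p ≠ [] := (goP_mem t [] (by simp) p (by rw [hgp]; simp)).1
              exact inter_ne_nil _ p ps hpne
          have htne : trimT (goA t true) ≠ [] := by rw [← hIH]; exact hPne
          rw [trimT_append cur ("" :: goA t true) (by
            rw [trimT_cons _ _ htne]; simp)]
          rw [trimT_cons _ _ htne, ← hIH]
          simp [List.append_assoc]
    · -- h non-blank: it joins the current paragraph on both sides
      have hgA : goA (h :: t) cur.isEmpty = h :: goA t false := by
        simp [goA, hh]
      have hgP : goP (h :: t) cur = goP t (cur ++ [h]) := by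
        simp [goP, hh]
      rw [hgA, hgP]
      have hIH := ih (cur ++ [h]) (by
        intro x hx
        rcases List.mem_append.mp hx with h1 | h1
        · exact hcur x h1
        · simp only [List.mem_singleton] at h1
          subst h1
          simpa using hh)
      have hne : (cur ++ [h]).isEmpty = false := by simp
      rw [hne] at hIH
      rw [hIH]
      simp [List.append_assoc]

-- joining with single-newline across blank separators = double-newline join of paragraphs
theorem join_paragraphs (Q : List (List String)) (h : ∀ p ∈ Q, p ≠ []) :
    PySem.Str.join "\n" (List.intercalate [""] Q)
      = PySem.Str.join "\n\n" (Q.map (PySem.Str.join "\n")) := by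
  induction Q with
  | nil => rfl
  | cons p t ih =>
    cases t with
    | nil => simp [List.intercalate, PySem.Str.join]
    | cons q t2 =>
      apply String.toList_inj.mp
      rw [PySem.Str.toList_join, PySem.Str.toList_join]
      have hsep1 : ("\n" : String).toList = ['\n'] := rfl
      have hsep2 : ("\n\n" : String).toList = ['\n', '\n'] := rfl
      rw [hsep1, hsep2]
      show List.intercalate ['\n'] _ = List.intercalate ['\n', '\n'] _
      have hp : p ≠ [] := h p (by simp)
      have hq : q ≠ [] := h q (by simp)
      have hR : List.intercalate [""] (q :: t2) ≠ [] := inter_ne_nil _ q t2 hq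
      have hRm : (List.intercalate [""] (q :: t2)).map String.toList ≠ [] := by
        simpa using hR
      rw [inter_cons [""] p (q :: t2) (by simp), List.append_assoc, List.map_append,
          inter_append ['\n'] (p.map String.toList) _ (by simpa using hp) (by simp)]
      have h1 : List.intercalate ['\n'] (List.map String.toList ([""] ++ List.intercalate [""] (q :: t2)))
          = ['\n'] ++ List.intercalate ['\n'] ((List.intercalate [""] (q :: t2)).map String.toList) := by
        rw [List.map_append]
        have hm : (([""] : List String).map String.toList) = [([] : List Char)] := rfl
        rw [hm, inter_append ['\n'] [([] : List Char)] _ (by simp) hRm]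
        simp [List.intercalate]
      rw [h1]
      have hIH := ih (fun p hp2 => h p (by simp [hp2]))
      have hIH2 := congrArg String.toList hIH
      rw [PySem.Str.toList_join, PySem.Str.toList_join, hsep1, hsep2] at hIH2
      have hmc : (List.map String.toList (PySem.Str.join "\n" p :: List.map (PySem.Str.join "\n") (q :: t2)))
          = (PySem.Str.join "\n" p).toList :: List.map String.toList (List.map (PySem.Str.join "\n") (q :: t2)) := rfl
      show _ = List.intercalate ['\n', '\n'] (List.map String.toList (List.map (PySem.Str.join "\n") (p :: q :: t2)))
      rw [List.map_cons, hmc,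
          inter_cons ['\n', '\n'] ((PySem.Str.join "\n" p).toList)
            (List.map String.toList (List.map (PySem.Str.join "\n") (q :: t2))) (by simp)]
      simp only [PySem.Chars.join] at hIH2
      rw [PySem.Str.toList_join, hsep1, ← hIH2]
      simp [PySem.Chars.join, List.append_assoc]

-- edge-cleanliness of every line A keeps
theorem goA_edge (text : String) (x : String)
    (hx : x ∈ goA ((PySem.Str.splitlines text).map PySem.Str.strip) false) :
    headNS x.toList = true ∧ headNS x.toList.reverse = true := by
  rcases goA_mem _ false x hx with h1 | h1
  · subst h1; exact ⟨rfl, rfl⟩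
  · rw [List.mem_map] at h1
    obtain ⟨y, _, rfl⟩ := h1
    rw [PySem.Str.toList_strip]
    exact ⟨strip_headNS _, strip_revHeadNS _⟩

-- ===== VERDICT (by name: the statement is the Claim_ definition above) =====
theorem normalize_text_block_spec : Claim_equal_normalize_text_block := by
  intro text _
  unfold Spec_normalize_text_block normalize_text_block normalize_text_block_alt
  simp only [foldB_eq_goP (PySem.Str.splitlines text) [] [], List.nil_append]
  simp only [foldA_eq_goA _ [] false, List.nil_append]
  set ls := (PySem.Str.splitlines text).map PySem.Str.strip with hls
  rw [strip_join _ (fun x hx => goA_edge text x hx)]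
  rw [dropB_goA_false]
  have hmain := main_gp ls [] (by simp)
  simp only [List.isEmpty_nil, List.nil_append] at hmain
  rw [← hmain]
  exact join_paragraphs _ (fun p hp => (goP_mem ls [] (by simp) p hp).1)
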